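-- pv_equiv track=rewrite | github.com/dododbobovo-commits/clx | collatz.py | collatz_segment
-- ===== SOURCE A (Python) =====
-- from typing import List, Tuple
--
-- def collatz_segment(start: int, max_steps: int) -> Tuple[List[int], int, int, bool]:
--     """
--     Считает ОДИН СЕГМЕНТ орбиты Коллатца, начиная с числа `start`.
--
--     max_steps — максимум шагов в этом сегменте.
--
--     Возвращает:
--     - values: список новых значений (БЕЗ самого start).
--       Например: start=7 → [22, 11, 34, ...]
--     - steps_done: сколько шагов реально сделано (<= max_steps)
--     - peak: максимальное значение, встреченное в этом сегменте
--     - reached_one: True, если по пути дошли до 1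
--     """
--     if start <= 0:
--         raise ValueError("start должно быть положительным")
--
--     current = start
--     values: List[int] = []
--     peak = start
--     steps_done = 0
--
--     for _ in range(max_steps):
--         if current == 1:
--             # Уже в 1, дальше шаги не делаем
--             return values, steps_done, peak, True
--
--         # Один шаг Коллатца
--         if current % 2 == 0:
--             current = current // 2
--         else:
--             current = 3 * current + 1
--
--         values.append(current)
--         steps_done += 1
--
--         if current > peak:
--             peak = current
--
--         if current == 1:
--             return values, steps_done, peak, True
--
--     # Лимит шагов исчерпан, но 1 не достигнута
--     return values, steps_done, peak, (current == 1)
-- ===== SOURCE B (Python) =====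
-- from typing import List, Tuple
--
-- def collatz_segment(start: int, max_steps: int) -> Tuple[List[int], int, int, bool]:
--     if start <= 0:
--         raise ValueError("start должно быть положительным")
--
--     def go(c: int, fuel: int) -> Tuple[List[int], int, int, bool]:
--         # Recursion on remaining fuel; stats are combined on the way back up.
--         if fuel <= 0 or c == 1:
--             return [], 0, c, c == 1
--         nxt = c // 2 if c % 2 == 0 else 3 * c + 1
--         vals, steps, peak, reached = go(nxt, fuel - 1)
--         return [nxt] + vals, steps + 1, max(c, peak), reached
--
--     return go(start, max_steps)
-- ===== Notes on version B (the rewrite author's own statement) =====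
-- stated objective: alternative
-- what changed: B replaces A's imperative for-loop with running counters, list mutation and two early returns by a recursive helper on the remaining fuel that builds the values list front-first via cons and combines steps_done, peak and reached_one on the way back up from the recursion.
import Mathlib
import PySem

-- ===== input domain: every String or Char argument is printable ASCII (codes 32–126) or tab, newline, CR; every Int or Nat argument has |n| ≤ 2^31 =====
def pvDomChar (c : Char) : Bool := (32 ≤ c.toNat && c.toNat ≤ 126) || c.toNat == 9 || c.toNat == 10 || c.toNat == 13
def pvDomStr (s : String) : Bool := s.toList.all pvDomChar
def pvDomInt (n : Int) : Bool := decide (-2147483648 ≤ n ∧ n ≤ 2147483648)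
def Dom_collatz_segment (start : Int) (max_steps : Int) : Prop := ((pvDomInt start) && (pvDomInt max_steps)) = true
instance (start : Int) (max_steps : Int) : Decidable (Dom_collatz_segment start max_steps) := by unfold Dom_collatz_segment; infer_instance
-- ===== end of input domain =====

-- B replaces A's imperative accumulator loop with early returns by a recursive helper on the
-- remaining fuel, building the values list front-first and combining stats on return (objective: alternative).

-- ===== PORT A =====
-- the Collatz step 'current // 2 if even else 3*current+1', identical in both sources
def collatzStep (c : Int) : Int :=
  if PySem.Int.mod c 2 == 0 then PySem.Int.floordiv c 2 else 3 * c + 1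

-- A's for-loop over range(max_steps) with its two early returns; state = (current, values, peak, steps_done)
def collatzA_loop (fuel : Nat) (current : Int) (values : List Int) (peak : Int) (steps : Int) :
    List Int × Int × Int × Bool :=
  match fuel with
  | 0 => (values, steps, peak, current == 1)
  | n + 1 =>
    if current == 1 then (values, steps, peak, true)
    else
      let c := collatzStep current
      let values' := values ++ [c]
      let steps' := steps + 1
      let peak' := if c > peak then c else peak
      if c == 1 then (values', steps', peak', true)
      else collatzA_loop n c values' peak' steps'

def collatz_segment (start : Int) (max_steps : Int) : List Int × Int × Int × Bool :=
  if start ≤ 0 then ([], 0, 0, false)  -- Python raises ValueError here; excluded by Pre_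
  else collatzA_loop max_steps.toNat start [] start 0

-- ===== PORT B =====
-- B's recursive helper go(c, fuel): cons the next value in front of the recursive result
-- and combine steps/peak/reached on the way back up
def collatzB_go (c : Int) (fuel : Int) : List Int × Int × Int × Bool :=
  if fuel ≤ 0 || c == 1 then ([], 0, c, c == 1)
  else
    let nxt := collatzStep c
    let r := collatzB_go nxt (fuel - 1)
    (nxt :: r.1, r.2.1 + 1, max c r.2.2.1, r.2.2.2)
termination_by fuel.toNat
decreasing_by simp at *; omega

def collatz_segment_alt (start : Int) (max_steps : Int) : List Int × Int × Int × Bool :=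
  if start ≤ 0 then ([], 0, 0, false)  -- Python raises ValueError here; excluded by Pre_
  else collatzB_go start max_steps

-- ===== PRECONDITION & SPEC =====
-- Pre_ excludes exactly start ≤ 0, where Python A raises ValueError.
def Pre_collatz_segment (start : Int) (max_steps : Int) : Prop := 0 < start
instance (start : Int) (max_steps : Int) : Decidable (Pre_collatz_segment start max_steps) := by
  unfold Pre_collatz_segment; infer_instance
def pvWitness_collatz_segment : Int × Int := (7, 5)

def Spec_collatz_segment (start : Int) (max_steps : Int) (out : List Int × Int × Int × Bool) : Prop := out = collatz_segment_alt start max_steps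
instance (start : Int) (max_steps : Int) (out : List Int × Int × Int × Bool) : Decidable (Spec_collatz_segment start max_steps out) := by unfold Spec_collatz_segment; infer_instance

-- ===== CLAIM (what is proved, stated in full; the proofs are below) =====
def Claim_equal_collatz_segment : Prop := ∀ (start : Int) (max_steps : Int), Dom_collatz_segment start max_steps → Pre_collatz_segment start max_steps → Spec_collatz_segment start max_steps (collatz_segment start max_steps)

-- ===== LEMMAS AND PROOFS =====

-- pure description of the segment: the list of new values and the final current
def orbitVals (fuel : Nat) (c : Int) : List Int :=
  match fuel with
  | 0 => []
  | n + 1 => if c == 1 then [] else collatzStep c :: orbitVals n (collatzStep c)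

def orbitFin (fuel : Nat) (c : Int) : Int :=
  match fuel with
  | 0 => c
  | n + 1 => if c == 1 then c else orbitFin n (collatzStep c)

theorem collatzStep_pos {c : Int} (hc : 0 < c) : 0 < collatzStep c := by
  unfold collatzStep
  by_cases h : PySem.Int.mod c 2 = 0
  · have hd : (2 : Int) ∣ c := (PySem.Int.mod_eq_zero_iff_dvd c 2).1 h
    have : PySem.Int.floordiv c 2 = c / 2 := PySem.Int.floordiv_eq_ediv_of_pos (by omega)
    simp [h, this]
    omega
  · simp [h]
    omega

theorem orbitVals_one (fuel : Nat) : orbitVals fuel 1 = [] := by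
  cases fuel <;> simp [orbitVals]

theorem orbitFin_one (fuel : Nat) : orbitFin fuel 1 = 1 := by
  cases fuel <;> simp [orbitFin]

theorem collatzB_go_eq_aux (n : Nat) : ∀ (fuel c : Int), fuel.toNat = n →
    collatzB_go c fuel =
      (orbitVals n c,
       ((orbitVals n c).length : Int),
       List.foldl max c (orbitVals n c),
       orbitFin n c == 1) := by
  induction n with
  | zero =>
    intro fuel c hn
    have h0 : fuel ≤ 0 := by omega
    rw [collatzB_go]
    simp [h0, orbitVals, orbitFin]
  | succ n ih =>
    intro fuel c hn
    have hle : ¬ (fuel ≤ 0) := by omega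
    rw [collatzB_go]
    by_cases h1 : c = 1
    · simp [hle, h1, orbitVals, orbitFin]
    · have ht' : (fuel - 1).toNat = n := by omega
      simp only [hle, h1, decide_false, Bool.or_false, decide_true, Bool.true_or,
        if_false, beq_iff_eq, Bool.false_or, if_neg, decide_eq_true_eq]
      rw [ih (fuel - 1) (collatzStep c) ht']
      simp [orbitVals, orbitFin, h1]
      rw [List.foldl_assoc]

theorem collatzB_go_eq (fuel c : Int) :
    collatzB_go c fuel =
      (orbitVals fuel.toNat c,
       ((orbitVals fuel.toNat c).length : Int),
       List.foldl max c (orbitVals fuel.toNat c),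
       orbitFin fuel.toNat c == 1) :=
  collatzB_go_eq_aux fuel.toNat fuel c rfl

theorem collatzA_loop_eq (fuel : Nat) :
    ∀ (c : Int) (acc : List Int) (peak steps : Int), 0 < c →
      collatzA_loop fuel c acc peak steps =
        (acc ++ orbitVals fuel c,
         steps + ((orbitVals fuel c).length : Int),
         List.foldl max peak (orbitVals fuel c),
         orbitFin fuel c == 1) := by
  induction fuel with
  | zero => intro c acc peak steps _; simp [collatzA_loop, orbitVals, orbitFin]
  | succ n ih =>
    intro c acc peak steps hc
    by_cases h : c = 1
    · simp [collatzA_loop, orbitVals, orbitFin, h]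
    · have hstep : 0 < collatzStep c := collatzStep_pos hc
      have hmax : ∀ x : Int, (if x > peak then x else peak) = max peak x := by
        intro x; rw [max_def]; split_ifs <;> omega
      by_cases h1 : collatzStep c = 1
      · simp [collatzA_loop, orbitVals, orbitFin, h, h1, orbitVals_one, orbitFin_one]
        rw [max_def]; split_ifs <;> omega
      · simp only [collatzA_loop, orbitVals, orbitFin, h, h1, if_neg, beq_iff_eq,
          if_false]
        rw [ih (collatzStep c) _ _ _ hstep]
        simp [h, h1, hmax, List.foldl]
        omega

theorem collatz_segment_eq_alt (start max_steps : Int) (h : 0 < start) :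
    collatz_segment start max_steps = collatz_segment_alt start max_steps := by
  unfold collatz_segment collatz_segment_alt
  have hns : ¬ start ≤ 0 := by omega
  simp only [hns, if_false]
  rw [collatzA_loop_eq _ _ _ _ _ h, collatzB_go_eq]
  simp

-- ===== VERDICT (by name: the statement is the Claim_ definition above) =====
theorem collatz_segment_spec : Claim_equal_collatz_segment := by
  intro start max_steps _ hpre
  exact collatz_segment_eq_alt start max_steps hpre
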